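-- pv_equiv track=rewrite | github.com/PR713/university-courses | algorithms-and-data-structures/WDI/96.podzbiór_o_danej_sumie.py | zad21
-- ===== SOURCE A (Python) =====
-- def zad21(T,S):
--     n = len(T)
--     def rek(T,S,s,k,w):#k,w tablice przechowujace False/True czy można
--         if s > S: #jeszcze wziąć element z danej kolumny lub wiersza
--             return False
--         if s == S and s != 0:
--             return True
--
--         for y in range(3):
--             if w[y]:
--                 for x in range(3):
--                     if k[x]:#obie True czyli można wziąć z danej pary w,k
--                         w[y],k[x] = False, False
--                         if rek(T,S,s+T[y][x],k,w):
--                             return True #bez tego if zwróci pierwsze lepsze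
-- # czyli może być False a True mogłoby nadal wystąpić i patrzy zarówno
-- # na warunek końcowy jak i tu poniżej na False,
-- # bo wywołujemy w ifie a bez if'a właśnie by zakończyło jak popadnie,
-- # a tutaj tylko czyha na to czy będzie True
--                         else:
--                             w[y], k[x] = True, True
--
--         return False
--     return rek(T,S,0,[True]*3,[True]*3)
-- ===== SOURCE B (Python) =====
-- def zad21(T, S):
--     if S <= 0:
--         return False
--     sums = []
--     for y in range(3):
--         for x in range(3):
--             sums.append(T[y][x])
--     for y1 in range(3):
--         for y2 in range(3):
--             if y1 < y2:
--                 for x1 in range(3):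
--                     for x2 in range(3):
--                         if x1 != x2:
--                             sums.append(T[y1][x1] + T[y2][x2])
--     for x0 in range(3):
--         for x1 in range(3):
--             for x2 in range(3):
--                 if x0 != x1 and x0 != x2 and x1 != x2:
--                     sums.append(T[0][x0] + T[1][x1] + T[2][x2])
--     return S in sums
-- ===== Notes on version B (the rewrite author's own statement) =====
-- stated objective: simpler
-- what changed: Replaces the recursive backtracking with mutable row/column availability arrays and pruning by a flat enumeration of all 33 distinct-row/distinct-column cell selections (sizes 1,2,3) of the 3x3 grid, answering True iff S>0 and one of their sums equals S (A's 'sum nonzero and never exceeded while descending' semantics makes exactly the positive target sums reachable).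
-- outside the precondition, e.g. on zad21([[5]], 5): A returns True, B raises IndexError
import Mathlib
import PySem

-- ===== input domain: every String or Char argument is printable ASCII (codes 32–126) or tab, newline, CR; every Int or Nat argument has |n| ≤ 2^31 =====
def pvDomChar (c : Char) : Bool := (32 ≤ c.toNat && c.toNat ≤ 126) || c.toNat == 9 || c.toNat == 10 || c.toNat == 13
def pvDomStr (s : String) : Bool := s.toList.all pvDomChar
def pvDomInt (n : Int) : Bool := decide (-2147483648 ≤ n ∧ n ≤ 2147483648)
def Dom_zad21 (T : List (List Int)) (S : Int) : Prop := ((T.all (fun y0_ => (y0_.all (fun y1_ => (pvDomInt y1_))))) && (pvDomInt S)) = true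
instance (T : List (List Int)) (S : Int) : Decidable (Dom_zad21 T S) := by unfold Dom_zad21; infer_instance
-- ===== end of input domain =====

-- B replaces A's backtracking over availability arrays by directly enumerating the 33
-- distinct-row/distinct-column cell selections of the 3x3 grid (simpler; not faster).

-- ===== PORT A =====
-- T[y][x]; indices here are always the naturals 0..2, so List.getD is exact on in-range
-- accesses; out-of-range (Python IndexError) is excluded by Pre_zad21.
def pvTij (T : List (List Int)) (y x : Nat) : Int := (T.getD y []).getD x 0

-- rek: the Python mutates w,k and restores them on failure, so each loop iteration sees the
-- original arrays; this is rendered purely by passing (k.set x false) / (w.set y false) down.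
-- fuel only makes the recursion total: the top call gives fuel 4 and at most 3 picks happen.
def zad21Rek (T : List (List Int)) (S : Int) : Nat → Int → List Bool → List Bool → Bool
  | 0, _, _, _ => false
  | fuel+1, s, k, w =>
    if S < s then false
    else if s = S ∧ s ≠ 0 then true
    else
      (List.range 3).any fun y =>
        w.getD y false &&
        ((List.range 3).any fun x =>
          k.getD x false &&
          zad21Rek T S fuel (s + pvTij T y x) (k.set x false) (w.set y false))

def zad21 (T : List (List Int)) (S : Int) : Bool :=
  zad21Rek T S 4 0 [true, true, true] [true, true, true]

-- ===== PORT B =====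
-- the list `sums` Source B builds with its append loops: all selections of 1, 2 or 3 cells
-- with pairwise distinct rows and pairwise distinct columns.
def pvSums (T : List (List Int)) : List Int :=
  ((List.range 3).flatMap fun y => (List.range 3).map fun x => pvTij T y x) ++
  ((List.range 3).flatMap fun y1 => (List.range 3).flatMap fun y2 =>
    if y1 < y2 then
      (List.range 3).flatMap fun x1 => (List.range 3).flatMap fun x2 =>
        if x1 ≠ x2 then [pvTij T y1 x1 + pvTij T y2 x2] else []
    else []) ++
  ((List.range 3).flatMap fun x0 => (List.range 3).flatMap fun x1 => (List.range 3).flatMap fun x2 =>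
    if x0 ≠ x1 ∧ x0 ≠ x2 ∧ x1 ≠ x2 then [pvTij T 0 x0 + pvTij T 1 x1 + pvTij T 2 x2] else [])

def zad21_alt (T : List (List Int)) (S : Int) : Bool :=
  if S ≤ 0 then false else (pvSums T).contains S

-- ===== PRECONDITION & SPEC =====
-- Python A raises IndexError when it touches a missing cell of the top-left 3x3 block; that
-- never happens for S < 0 (immediate prune). Pre_ therefore demands the full 3x3 shape unless
-- S < 0. This excludes some ragged inputs on which A still RETURNS True because an early exact
-- hit stops it before the missing cell (e.g. ([[5]], 5)); B naturally raises there.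
def Pre_zad21 (T : List (List Int)) (S : Int) : Prop :=
  S < 0 ∨ (3 ≤ T.length ∧ ∀ row ∈ T.take 3, 3 ≤ row.length)
instance (T : List (List Int)) (S : Int) : Decidable (Pre_zad21 T S) := by
  unfold Pre_zad21; infer_instance

def pvWitness_zad21 : List (List Int) × Int := ([[1, 2, 3], [4, 5, 6], [7, 8, 9]], 6)

def Spec_zad21 (T : List (List Int)) (S : Int) (out : Bool) : Prop := out = zad21_alt T S
instance (T : List (List Int)) (S : Int) (out : Bool) : Decidable (Spec_zad21 T S out) := by
  unfold Spec_zad21; infer_instance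

-- ===== CLAIM (what is proved, stated in full; the proofs are below) =====
def Claim_equal_zad21 : Prop :=
  ∀ (T : List (List Int)) (S : Int), Dom_zad21 T S → Pre_zad21 T S → Spec_zad21 T S (zad21 T S)

-- ===== LEMMAS AND PROOFS =====

-- pick sequences rek can accept from state (s,k,w): pairwise-distinct available rows/columns,
-- every partial sum ≤ S, final sum = S ≠ 0.
def pvReach (S : Int) (t : Nat → Nat → Int) : Int → List Bool → List Bool → List (Nat × Nat) → Prop
  | s, _, _, [] => s = S ∧ s ≠ 0
  | s, k, w, (y, x) :: rest =>
      y < 3 ∧ x < 3 ∧ w.getD y false = true ∧ k.getD x false = true ∧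
        s + t y x ≤ S ∧ pvReach S t (s + t y x) (k.set x false) (w.set y false) rest

lemma count_set_of_getD (w : List Bool) (y : Nat) (h : w.getD y false = true) :
    (w.set y false).count true + 1 = w.count true := by
  induction w generalizing y with
  | nil => simp [List.getD] at h
  | cons a l ih =>
    cases y with
    | zero =>
      simp [List.getD] at h
      subst h
      simp

    | succ y =>
      simp [List.getD] at h
      have := ih y h
      simp only [List.set, List.count_cons]
      omega

lemma rek_iff (T : List (List Int)) (S : Int) :
    ∀ (fuel : Nat) (s : Int) (k w : List Bool), w.count true < fuel →
      (zad21Rek T S fuel s k w = true ↔ s ≤ S ∧ ∃ ps, pvReach S (pvTij T) s k w ps) := by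
  intro fuel
  induction fuel with
  | zero => intro s k w h; omega
  | succ n ih =>
    intro s k w hcount
    by_cases h1 : S < s
    · simp only [zad21Rek, if_pos h1]
      constructor
      · intro h; cases h
      · rintro ⟨hs, -⟩; omega
    · by_cases h2 : s = S ∧ s ≠ 0
      · simp only [zad21Rek, if_neg h1, if_pos h2]
        exact ⟨fun _ => ⟨by omega, [], h2⟩, fun _ => trivial⟩
      · simp only [zad21Rek, if_neg h1, if_neg h2]
        constructor
        · intro hl
          simp only [List.any_eq_true, List.mem_range, Bool.and_eq_true] at hl
          obtain ⟨y, hy, hwy, x, hx, hkx, hrek⟩ := hl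
          have hc : (w.set y false).count true < n := by
            have := count_set_of_getD w y hwy; omega
          obtain ⟨hle, ps, hps⟩ := (ih _ _ _ hc).mp hrek
          exact ⟨by omega, (y, x) :: ps, hy, hx, hwy, hkx, hle, hps⟩
        · rintro ⟨hs, ps, hps⟩
          match ps with
          | [] => exact absurd hps h2
          | (y, x) :: rest =>
            obtain ⟨hy, hx, hwy, hkx, hle, hrest⟩ := hps
            simp only [List.any_eq_true, List.mem_range, Bool.and_eq_true]
            refine ⟨y, hy, hwy, x, hx, hkx, ?_⟩
            have hc : (w.set y false).count true < n := by
              have := count_set_of_getD w y hwy; omega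
            exact (ih _ _ _ hc).mpr ⟨hle, rest, hrest⟩

lemma reach_S_ne (S : Int) (t : Nat → Nat → Int) :
    ∀ (ps : List (Nat × Nat)) (s : Int) (k w : List Bool), pvReach S t s k w ps → S ≠ 0 := by
  intro ps
  induction ps with
  | nil => intro s k w h; obtain ⟨h1, h2⟩ := h; omega
  | cons p rest ih =>
    obtain ⟨y, x⟩ := p
    intro s k w h
    exact ih _ _ _ h.2.2.2.2.2

lemma getD_set_false_ne (l : List Bool) (i j : Nat)
    (h : (l.set i false).getD j false = true) : j ≠ i ∧ l.getD j false = true := by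
  induction l generalizing i j with
  | nil => simp [List.getD] at h
  | cons a l ih =>
    cases i with
    | zero =>
      cases j with
      | zero => simp [List.getD] at h
      | succ j => simp_all [List.getD]
    | succ i =>
      cases j with
      | zero => simp_all [List.getD]
      | succ j =>
        simp only [List.set] at h
        simp [List.getD] at h ⊢
        have := ih i j h
        exact ⟨by omega, this.2⟩

lemma full_getD (y : Nat) (hy : y < 3) : ([true, true, true] : List Bool).getD y false = true := by
  interval_cases y <;> rfl

lemma getD_set_ne (l : List Bool) (i j : Nat) (h : j ≠ i) :
    (l.set i false).getD j false = l.getD j false := by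
  induction l generalizing i j with
  | nil => simp
  | cons a l ih =>
    cases i with
    | zero => cases j with
      | zero => omega
      | succ j => simp [List.getD]
    | succ i =>
      cases j with
      | zero => simp [List.getD]
      | succ j => simp only [List.set, List.getD_cons_succ]; exact ih i j (by omega)

lemma set_getD (y' y : Nat) (h' : y' < 3) (h : y' ≠ y) :
    (([true, true, true] : List Bool).set y false).getD y' false = true := by
  rw [getD_set_ne _ _ _ h]; exact full_getD y' h'

lemma mk1 (T : List (List Int)) (S : Int) (y x : Nat) (hy : y < 3) (hx : x < 3)
    (h : pvTij T y x = S) (hS : 0 < S) :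
    pvReach S (pvTij T) 0 [true, true, true] [true, true, true] [(y, x)] := by
  refine ⟨hy, hx, full_getD y hy, full_getD x hx, by omega, ?_, by omega⟩
  omega

lemma mk2 (T : List (List Int)) (S : Int) (y1 x1 y2 x2 : Nat)
    (hy1 : y1 < 3) (hx1 : x1 < 3) (hy2 : y2 < 3) (hx2 : x2 < 3)
    (hyne : y2 ≠ y1) (hxne : x2 ≠ x1)
    (hord : pvTij T y1 x1 ≤ pvTij T y2 x2)
    (hsum : pvTij T y1 x1 + pvTij T y2 x2 = S) (hS : 0 < S) :
    pvReach S (pvTij T) 0 [true, true, true] [true, true, true] [(y1, x1), (y2, x2)] := by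
  refine ⟨hy1, hx1, full_getD y1 hy1, full_getD x1 hx1, by omega,
    hy2, hx2, set_getD y2 y1 hy2 hyne, set_getD x2 x1 hx2 hxne, by omega, ?_, by omega⟩
  omega

lemma set2_getD (j i1 i2 : Nat) (hj : j < 3) (h1 : j ≠ i1) (h2 : j ≠ i2) :
    ((([true, true, true] : List Bool).set i1 false).set i2 false).getD j false = true := by
  rw [getD_set_ne _ _ _ h2, getD_set_ne _ _ _ h1]
  exact full_getD j hj

lemma mk3 (T : List (List Int)) (S : Int) (y1 x1 y2 x2 y3 x3 : Nat)
    (hy1 : y1 < 3) (hx1 : x1 < 3) (hy2 : y2 < 3) (hx2 : x2 < 3) (hy3 : y3 < 3) (hx3 : x3 < 3)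
    (hy21 : y2 ≠ y1) (hy31 : y3 ≠ y1) (hy32 : y3 ≠ y2)
    (hx21 : x2 ≠ x1) (hx31 : x3 ≠ x1) (hx32 : x3 ≠ x2)
    (h12 : pvTij T y1 x1 ≤ pvTij T y2 x2) (h23 : pvTij T y2 x2 ≤ pvTij T y3 x3)
    (hsum : pvTij T y1 x1 + pvTij T y2 x2 + pvTij T y3 x3 = S) (hS : 0 < S) :
    pvReach S (pvTij T) 0 [true, true, true] [true, true, true]
      [(y1, x1), (y2, x2), (y3, x3)] := by
  refine ⟨hy1, hx1, full_getD y1 hy1, full_getD x1 hx1, by omega,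
    hy2, hx2, set_getD y2 y1 hy2 hy21, set_getD x2 x1 hx2 hx21, by omega,
    hy3, hx3, set2_getD y3 y1 y2 hy3 hy31 hy32, set2_getD x3 x1 x2 hx3 hx31 hx32,
    by omega, ?_, by omega⟩
  omega

lemma mem_sums_form (T : List (List Int)) (z : Int) :
    z ∈ pvSums T ↔
      (∃ y < 3, ∃ x < 3, pvTij T y x = z) ∨
      (∃ y1 < 3, ∃ y2 < 3, y1 < y2 ∧ ∃ x1 < 3, ∃ x2 < 3, x1 ≠ x2 ∧
        z = pvTij T y1 x1 + pvTij T y2 x2) ∨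
      (∃ x0 < 3, ∃ x1 < 3, ∃ x2 < 3, (x0 ≠ x1 ∧ x0 ≠ x2 ∧ x1 ≠ x2) ∧
        z = pvTij T 0 x0 + pvTij T 1 x1 + pvTij T 2 x2) := by
  simp [pvSums, List.mem_append, List.mem_flatMap, List.mem_range]

lemma reach_of_mem (T : List (List Int)) (S : Int) (hS : 0 < S) (h : S ∈ pvSums T) :
    ∃ ps, pvReach S (pvTij T) 0 [true, true, true] [true, true, true] ps := by
  rcases (mem_sums_form T S).mp h with ⟨y, hy, x, hx, heq⟩ |
    ⟨y1, hy1, y2, hy2, hlt, x1, hx1, x2, hx2, hne, heq⟩ |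
    ⟨x0, hx0, x1, hx1, x2, hx2, ⟨h01, h02, h12⟩, heq⟩
  · exact ⟨_, mk1 T S y x hy hx heq hS⟩
  · by_cases hc : pvTij T y1 x1 ≤ pvTij T y2 x2
    · exact ⟨_, mk2 T S y1 x1 y2 x2 hy1 hx1 hy2 hx2 (by omega) (by omega) hc (by omega) hS⟩
    · exact ⟨_, mk2 T S y2 x2 y1 x1 hy2 hx2 hy1 hx1 (by omega) (by omega) (by omega) (by omega) hS⟩
  · set a := pvTij T 0 x0 with ha
    set b := pvTij T 1 x1 with hb
    set c := pvTij T 2 x2 with hc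
    by_cases g1 : a ≤ b <;> by_cases g2 : a ≤ c <;> by_cases g3 : b ≤ c
    · exact ⟨_, mk3 T S 0 x0 1 x1 2 x2 (by omega) hx0 (by omega) hx1 (by omega) hx2
        (by omega) (by omega) (by omega) (by omega) (by omega) (by omega) g1 g3 (by omega) hS⟩
    · exact ⟨_, mk3 T S 0 x0 2 x2 1 x1 (by omega) hx0 (by omega) hx2 (by omega) hx1
        (by omega) (by omega) (by omega) (by omega) (by omega) (by omega) g2 (by omega) (by omega) hS⟩
    · exact absurd (le_trans g1 g3) g2
    · exact ⟨_, mk3 T S 2 x2 0 x0 1 x1 (by omega) hx2 (by omega) hx0 (by omega) hx1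
        (by omega) (by omega) (by omega) (by omega) (by omega) (by omega) (by omega) g1 (by omega) hS⟩
    · exact ⟨_, mk3 T S 1 x1 0 x0 2 x2 (by omega) hx1 (by omega) hx0 (by omega) hx2
        (by omega) (by omega) (by omega) (by omega) (by omega) (by omega) (by omega) g2 (by omega) hS⟩
    · exact absurd (le_trans g2 (by omega : c ≤ b)) g1
    · exact ⟨_, mk3 T S 1 x1 2 x2 0 x0 (by omega) hx1 (by omega) hx2 (by omega) hx0
        (by omega) (by omega) (by omega) (by omega) (by omega) (by omega) g3 (by omega) (by omega) hS⟩
    · exact ⟨_, mk3 T S 2 x2 1 x1 0 x0 (by omega) hx2 (by omega) hx1 (by omega) hx0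
        (by omega) (by omega) (by omega) (by omega) (by omega) (by omega) (by omega) (by omega) (by omega) hS⟩

lemma mem_of_reach (T : List (List Int)) (S : Int) (ps : List (Nat × Nat))
    (h : pvReach S (pvTij T) 0 [true, true, true] [true, true, true] ps) :
    S ∈ pvSums T := by
  rw [mem_sums_form]
  match ps with
  | [] => exact absurd rfl h.2
  | [(y, x)] =>
    obtain ⟨hy, hx, -, -, -, hfin, hne⟩ := h
    exact Or.inl ⟨y, hy, x, hx, by omega⟩
  | [(y1, x1), (y2, x2)] =>
    obtain ⟨hy1, hx1, -, -, hle1, hy2, hx2, hw2, hk2, hle2, hfin, hne⟩ := h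
    have hry := (getD_set_false_ne _ _ _ hw2).1
    have hrx := (getD_set_false_ne _ _ _ hk2).1
    refine Or.inr (Or.inl ?_)
    by_cases hlt : y1 < y2
    · exact ⟨y1, hy1, y2, hy2, hlt, x1, hx1, x2, hx2, by omega, by omega⟩
    · exact ⟨y2, hy2, y1, hy1, by omega, x2, hx2, x1, hx1, by omega, by omega⟩
  | [(y1, x1), (y2, x2), (y3, x3)] =>
    obtain ⟨hy1, hx1, -, -, hle1, hy2, hx2, hw2, hk2, hle2,
      hy3, hx3, hw3, hk3, hle3, hfin, hne⟩ := h
    have hr21 := (getD_set_false_ne _ _ _ hw2).1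
    have hc21 := (getD_set_false_ne _ _ _ hk2).1
    obtain ⟨hr32, hw3'⟩ := getD_set_false_ne _ _ _ hw3
    have hr31 := (getD_set_false_ne _ _ _ hw3').1
    obtain ⟨hc32, hk3'⟩ := getD_set_false_ne _ _ _ hk3
    have hc31 := (getD_set_false_ne _ _ _ hk3').1
    refine Or.inr (Or.inr ?_)
    clear hw2 hk2 hw3 hk3 hw3' hk3'
    interval_cases y1 <;> interval_cases y2 <;> interval_cases y3 <;>
      first
      | omega
      | exact ⟨x1, hx1, x2, hx2, x3, hx3, ⟨by omega, by omega, by omega⟩, by omega⟩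
      | exact ⟨x1, hx1, x3, hx3, x2, hx2, ⟨by omega, by omega, by omega⟩, by omega⟩
      | exact ⟨x2, hx2, x1, hx1, x3, hx3, ⟨by omega, by omega, by omega⟩, by omega⟩
      | exact ⟨x3, hx3, x1, hx1, x2, hx2, ⟨by omega, by omega, by omega⟩, by omega⟩
      | exact ⟨x2, hx2, x3, hx3, x1, hx1, ⟨by omega, by omega, by omega⟩, by omega⟩
      | exact ⟨x3, hx3, x2, hx2, x1, hx1, ⟨by omega, by omega, by omega⟩, by omega⟩
  | (y1, x1) :: (y2, x2) :: (y3, x3) :: (y4, x4) :: rest =>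
    obtain ⟨hy1, -, -, -, -, hy2, -, hw2, -, -, hy3, -, hw3, -, -,
      hy4, -, hw4, -, -, -⟩ := h
    have hr21 := (getD_set_false_ne _ _ _ hw2).1
    obtain ⟨hr32, hw3'⟩ := getD_set_false_ne _ _ _ hw3
    have hr31 := (getD_set_false_ne _ _ _ hw3').1
    obtain ⟨hr43, hw4'⟩ := getD_set_false_ne _ _ _ hw4
    obtain ⟨hr42, hw4''⟩ := getD_set_false_ne _ _ _ hw4'
    have hr41 := (getD_set_false_ne _ _ _ hw4'').1
    omega

lemma count_full_lt : ([true, true, true] : List Bool).count true < 4 := by decide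

theorem zad21_spec : Claim_equal_zad21 := by
  intro T S hdom hpre
  unfold Spec_zad21 zad21 zad21_alt
  by_cases hS : S ≤ 0
  · rw [if_pos hS]
    cases hres : zad21Rek T S 4 0 [true, true, true] [true, true, true] with
    | false => rfl
    | true =>
      obtain ⟨h0, ps, hps⟩ := (rek_iff T S 4 0 _ _ count_full_lt).mp hres
      have := reach_S_ne S (pvTij T) ps _ _ _ hps
      omega
  · rw [if_neg hS]
    have hiff := rek_iff T S 4 0 [true, true, true] [true, true, true] count_full_lt
    cases hres : zad21Rek T S 4 0 [true, true, true] [true, true, true] with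
    | true =>
      obtain ⟨-, ps, hps⟩ := hiff.mp hres
      have hmem : S ∈ pvSums T := mem_of_reach T S ps hps
      symm
      simpa [List.contains_iff_mem] using hmem
    | false =>
      by_contra hcon
      have hmem : S ∈ pvSums T := by
        simpa [List.contains_iff_mem] using (Bool.not_eq_false _).mp (Ne.symm hcon)
      obtain ⟨ps, hps⟩ := reach_of_mem T S (by omega) hmem
      have := hiff.mpr ⟨by omega, ps, hps⟩
      rw [hres] at this; cases this
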